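-- pv_equiv track=rewrite | github.com/jz33/LeetCodeSolutions | T-1170 Compare Strings by Frequency of the Smallest Character.py | sf
-- ===== SOURCE A (Python) =====
-- def sf(s: str) -> int:
--     sc = None # smallest char
--     cc = 0 # smallest char count
--     for c in s:
--         if sc is None or ord(c) < ord(sc):
--             sc = c
--             cc = 1
--         elif c == sc:
--             cc += 1
--     return cc
-- ===== SOURCE B (Python) =====
-- def sf(s: str) -> int:
--     if not s:
--         return 0
--     return s.count(min(s))
-- ===== Notes on version B (the rewrite author's own statement) =====
-- stated objective: simpler
-- what changed: Replaced the fused single-pass loop tracking (smallest char, count) by two library scans: min(s) then s.count(min(s)), with an explicit 0 for the empty string.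
import Mathlib
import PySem

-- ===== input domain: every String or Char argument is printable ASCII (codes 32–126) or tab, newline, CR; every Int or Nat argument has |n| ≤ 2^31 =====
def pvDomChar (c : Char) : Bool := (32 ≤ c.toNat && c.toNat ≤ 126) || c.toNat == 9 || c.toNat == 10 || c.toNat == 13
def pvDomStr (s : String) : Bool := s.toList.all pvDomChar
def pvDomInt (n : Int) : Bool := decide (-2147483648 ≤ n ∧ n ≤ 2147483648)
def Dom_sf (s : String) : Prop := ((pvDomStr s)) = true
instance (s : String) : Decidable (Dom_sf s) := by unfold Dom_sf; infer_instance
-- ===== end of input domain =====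

-- B computes min(s) and counts it with two library scans instead of A's fused tracking loop (objective: simpler).

-- ===== PORT A =====
-- A's loop state: (smallest char seen or none, its count)
def sfStep (st : Option Char × Int) (c : Char) : Option Char × Int :=
  match st with
  | (none, _) => (some c, 1)
  | (some sc, cc) =>
    if c < sc then (some c, 1)
    else if c = sc then (some sc, cc + 1)
    else (some sc, cc)

def sf (s : String) : Int :=
  (s.toList.foldl sfStep (none, 0)).2

-- ===== PORT B =====
def sf_alt (s : String) : Int :=
  if s.toList = [] then 0
  else
    match PySem.List.min? s.toList (fun x => x) with
    | none => 0
    | some m => (PySem.List.count s.toList m : Int)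

-- ===== PRECONDITION & SPEC =====
def Spec_sf (s : String) (out : Int) : Prop := out = sf_alt s
instance (s : String) (out : Int) : Decidable (Spec_sf s out) := by unfold Spec_sf; infer_instance

-- ===== CLAIM (what is proved, stated in full; the proofs are below) =====
def Claim_equal_sf : Prop := ∀ (s : String), Dom_sf s → Spec_sf s (sf s)

-- ===== LEMMAS AND PROOFS =====

-- Loop invariant: with state (some m, c), the final count is the count of the overall
-- minimum in the remaining list, plus c if the minimum stays m.
theorem foldl_min_le (t : List Char) (m : Char) : t.foldl min m ≤ m := by
  induction t generalizing m with
  | nil => simp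
  | cons x t ih => exact le_trans (ih (min m x)) (min_le_left m x)

theorem sf_loop (l : List Char) (m : Char) (c : Int) :
    (l.foldl sfStep (some m, c)).2 =
      (l.count (l.foldl min m) : Int) + (if l.foldl min m = m then c else 0) := by
  induction l generalizing m c with
  | nil => simp
  | cons x t ih =>
    simp only [List.foldl_cons, List.count_cons]
    by_cases hx : x < m
    · have hmin : min m x = x := min_eq_right (le_of_lt hx)
      simp only [hmin]
      rw [show sfStep (some m, c) x = (some x, 1) by simp [sfStep, hx], ih]
      have hle : t.foldl min x ≤ x := foldl_min_le t x
      have hne : t.foldl min x ≠ m := fun h => absurd hx (by rw [← h]; exact not_lt.mpr hle)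
      rcases eq_or_ne (t.foldl min x) x with h | h
      · simp only [h, beq_self_eq_true, if_true]
        rcases eq_or_ne x m with hxm | hxm
        · exact absurd (h.trans hxm) hne
        · simp [hxm]
      · have hb : (x == t.foldl min x) = false := by
          simp only [beq_eq_false_iff_ne, ne_eq]
          exact fun hh => h hh.symm
        simp [h, hne, hb]
    · have hmin : min m x = m := min_eq_left (le_of_not_gt hx)
      simp only [hmin]
      by_cases hxm : x = m
      · rw [show sfStep (some m, c) x = (some m, c + 1) by simp [sfStep, hxm], ih]
        rcases eq_or_ne (t.foldl min m) m with h | h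
        · simp [h, hxm]; ring
        · have hb : (x == t.foldl min m) = false := by
            simp only [beq_eq_false_iff_ne, ne_eq, hxm]
            exact fun hh => h hh.symm
          simp [h, hb]
      · rw [show sfStep (some m, c) x = (some m, c) by simp [sfStep, hx, hxm], ih]
        have hle : t.foldl min m ≤ m := foldl_min_le t m
        have hxne : x ≠ t.foldl min m := by
          intro h
          rcases lt_or_eq_of_le (h ▸ hle) with hh | hh
          · exact hx hh
          · exact hxm hh
        have hb : (x == t.foldl min m) = false := by simp [beq_eq_false_iff_ne, hxne]
        simp [hb]

-- ===== VERDICT (by name: the statement is the Claim_ definition above) =====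
theorem sf_spec : Claim_equal_sf := by
  intro s _
  unfold Spec_sf sf sf_alt
  cases h : s.toList with
  | nil => simp
  | cons x t =>
    simp only [List.foldl_cons, PySem.List.min?_id_cons, List.cons_ne_nil, if_false,
      PySem.List.count_eq]
    rw [show sfStep (none, 0) x = (some x, 1) from rfl, sf_loop, List.count_cons]
    rcases eq_or_ne (t.foldl min x) x with hh | hh
    · simp [hh]
    · have hb : (x == t.foldl min x) = false := by
        simp only [beq_eq_false_iff_ne, ne_eq]
        exact fun h2 => hh h2.symm
      simp [hh, hb]
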